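-- pv_equiv track=rewrite | github.com/Brunopezman/Algoritmos-y-Programacion-I | Ejercicios guia/6. Cadenas de caracteres/6.2_6.3.py | cada_tres_digitos
-- ===== SOURCE A (Python) =====
-- def cada_tres_digitos(cadena, caracter):
--
--     nueva_cadena = ''
--     intervalo = 3
--     acumulado = 0
--
--     for digito in cadena:
--         if acumulado == intervalo:
--             nueva_cadena += caracter
--             acumulado += 1
--
--         nueva_cadena += digito
--         acumulado += 1
--
--     return nueva_cadena
-- ===== SOURCE B (Python) =====
-- def cada_tres_digitos(cadena, caracter):
--     if len(cadena) > 3: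
--         return cadena[:3] + caracter + cadena[3:]
--     return cadena
-- ===== Notes on version B (the rewrite author's own statement) =====
-- stated objective: faster
-- what changed: Replaced the character-by-character loop with its acumulado/intervalo counter (quadratic repeated string concatenation) by a single length test and a closed-form slice insertion cadena[:3] + caracter + cadena[3:].
import Mathlib
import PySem

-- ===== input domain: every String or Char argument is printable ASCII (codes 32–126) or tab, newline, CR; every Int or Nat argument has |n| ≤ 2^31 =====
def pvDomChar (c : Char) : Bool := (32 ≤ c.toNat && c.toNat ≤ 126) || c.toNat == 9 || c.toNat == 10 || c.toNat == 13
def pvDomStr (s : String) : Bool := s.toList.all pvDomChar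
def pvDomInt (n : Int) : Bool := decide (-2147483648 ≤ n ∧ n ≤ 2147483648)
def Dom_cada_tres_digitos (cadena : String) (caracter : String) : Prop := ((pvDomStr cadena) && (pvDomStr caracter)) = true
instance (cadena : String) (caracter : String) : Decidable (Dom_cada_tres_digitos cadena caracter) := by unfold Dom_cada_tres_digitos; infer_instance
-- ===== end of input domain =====

-- B replaces A's per-character loop with counter bookkeeping by one length test and a closed-form slice (simpler).

-- ===== PORT A =====
-- the for-loop of A: state = (nueva_cadena as List Char, acumulado); intervalo = 3
def cadaTresLoop (caracter : List Char) : List Char → List Char → Int → List Char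
  | [], nueva, _ => nueva
  | d :: rest, nueva, acumulado =>
    if acumulado == 3 then
      cadaTresLoop caracter rest ((nueva ++ caracter) ++ [d]) ((acumulado + 1) + 1)
    else
      cadaTresLoop caracter rest (nueva ++ [d]) (acumulado + 1)

def cada_tres_digitos (cadena : String) (caracter : String) : String :=
  String.ofList (cadaTresLoop caracter.toList cadena.toList [] 0)

-- ===== PORT B =====
def cada_tres_digitos_alt (cadena : String) (caracter : String) : String :=
  if 3 < cadena.toList.length then
    String.ofList (PySem.List.slice cadena.toList none (some 3)
      ++ caracter.toList ++ PySem.List.slice cadena.toList (some 3) none)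
  else
    cadena

-- ===== PRECONDITION & SPEC =====
def Spec_cada_tres_digitos (cadena : String) (caracter : String) (out : String) : Prop := out = cada_tres_digitos_alt cadena caracter
instance (cadena : String) (caracter : String) (out : String) : Decidable (Spec_cada_tres_digitos cadena caracter out) := by unfold Spec_cada_tres_digitos; infer_instance

-- ===== CLAIM (what is proved, stated in full; the proofs are below) =====
def Claim_equal_cada_tres_digitos : Prop := ∀ (cadena : String) (caracter : String), Dom_cada_tres_digitos cadena caracter → Spec_cada_tres_digitos cadena caracter (cada_tres_digitos cadena caracter)

-- ===== LEMMAS AND PROOFS =====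

-- once acumulado ≥ 4 the insertion branch never fires again: the loop just appends the rest
theorem cadaTresLoop_ge_four (c : List Char) (l : List Char) :
    ∀ (acc : List Char) (a : Int), 4 ≤ a → cadaTresLoop c l acc a = acc ++ l := by
  induction l with
  | nil => intro acc a _; simp [cadaTresLoop]
  | cons d rest ih =>
    intro acc a ha
    have hne : (a == 3) = false := beq_eq_false_iff_ne.mpr (by omega)
    simp only [cadaTresLoop, hne]
    rw [ih (acc ++ [d]) (a + 1) (by omega)]
    simp

theorem cada_tres_digitos_spec : Claim_equal_cada_tres_digitos := by
  intro cadena caracter _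
  unfold Spec_cada_tres_digitos cada_tres_digitos cada_tres_digitos_alt
  obtain ⟨l, rfl⟩ : ∃ l, cadena = String.ofList l := ⟨cadena.toList, String.ofList_toList.symm⟩
  simp only [String.toList_ofList]
  rw [PySem.List.slice_to _ (by norm_num), PySem.List.slice_from _ (by norm_num)]
  match l with
  | [] => simp [cadaTresLoop]
  | [x] => simp [cadaTresLoop]
  | [x, y] => simp [cadaTresLoop]
  | [x, y, z] => simp [cadaTresLoop]
  | x :: y :: z :: d :: rest =>
    have h5 : ∀ acc : List Char, cadaTresLoop caracter.toList rest acc 5 = acc ++ rest :=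
      fun acc => cadaTresLoop_ge_four _ rest acc 5 (by omega)
    simp [cadaTresLoop, h5]
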